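-- pv_equiv track=rewrite | github.com/zhaoyanz405/leetcode | pointer/problem977.py | find_first_positive_number
-- ===== SOURCE A (Python) =====
-- def find_first_positive_number(nums):
--     left = 0
--     right = len(nums) - 1
--
--     while left <= right:
--         mid = left + int((right - left) >> 1)
--         if nums[mid] >= 0:
--             right = mid - 1
--         else:
--             left = mid + 1
--
--     return left
-- ===== SOURCE B (Python) =====
-- def find_first_positive_number(nums):
--     def take(lo, hi):
--         if lo > hi:
--             return lo
--         mid = lo + ((hi - lo) >> 1)
--         if nums[mid] >= 0:
--             return take(lo, mid - 1)
--         return take(mid + 1, hi)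
--     return take(0, len(nums) - 1)
-- ===== Notes on version B (the rewrite author's own statement) =====
-- stated objective: alternative
-- what changed: B recasts A's imperative two-pointer loop as a pure recursive helper take(lo, hi) with no mutable state, recursing on the half chosen by the same probe, so the partition path and result are identical.
import Mathlib
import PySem

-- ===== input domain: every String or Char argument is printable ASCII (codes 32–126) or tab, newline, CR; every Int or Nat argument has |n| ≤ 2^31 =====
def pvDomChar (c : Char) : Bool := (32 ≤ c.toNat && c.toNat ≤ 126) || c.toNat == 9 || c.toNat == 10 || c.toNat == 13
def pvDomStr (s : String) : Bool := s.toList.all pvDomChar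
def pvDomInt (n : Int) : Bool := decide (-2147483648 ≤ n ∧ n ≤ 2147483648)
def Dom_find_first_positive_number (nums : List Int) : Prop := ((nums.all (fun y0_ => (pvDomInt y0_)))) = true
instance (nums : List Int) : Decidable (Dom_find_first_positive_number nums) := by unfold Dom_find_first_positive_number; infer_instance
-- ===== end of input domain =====

-- B recasts A's imperative two-pointer loop as a pure recursive helper take(lo, hi)
-- (well-founded recursion on the interval width), same probe sequence, same result
-- (objective: alternative). A's loop carries a Nat fuel solely as a structural totality
-- guard; fuel = len(nums)+1 never runs out, so the port computes exactly its Python.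

-- ===== PORT A =====
-- while left <= right: mid = left + ((right-left) >> 1); probe; move left or right.
-- nums[mid] is always in range on reachable states, so the 0-default of pyGetD is unused.
def pvLoopA (nums : List Int) : Nat → Int → Int → Int
  | 0, left, _ => left
  | fuel + 1, left, right =>
    if left ≤ right then
      let mid := left + PySem.Int.floordiv (right - left) 2
      if PySem.List.pyGetD nums mid 0 ≥ 0 then pvLoopA nums fuel left (mid - 1)
      else pvLoopA nums fuel (mid + 1) right
    else left

def find_first_positive_number (nums : List Int) : Int :=
  pvLoopA nums (nums.length + 1) 0 ((nums.length : Int) - 1)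

-- ===== PORT B =====
-- def take(lo, hi): base case lo > hi, else recurse on the half chosen by the probe.
-- Structural: well-founded recursion on the interval width (hi + 1 - lo).toNat.
def pvTake (nums : List Int) (lo hi : Int) : Int :=
  if lo > hi then lo
  else
    let mid := lo + PySem.Int.floordiv (hi - lo) 2
    if PySem.List.pyGetD nums mid 0 ≥ 0 then pvTake nums lo (mid - 1)
    else pvTake nums (mid + 1) hi
termination_by (hi + 1 - lo).toNat
decreasing_by
  all_goals
    rw [PySem.Int.floordiv_eq_ediv_of_pos (by norm_num : (0:Int) < 2)]
    omega

def find_first_positive_number_alt (nums : List Int) : Int :=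
  pvTake nums 0 ((nums.length : Int) - 1)

-- ===== PRECONDITION & SPEC =====
def Spec_find_first_positive_number (nums : List Int) (out : Int) : Prop := out = find_first_positive_number_alt nums
instance (nums : List Int) (out : Int) : Decidable (Spec_find_first_positive_number nums out) := by unfold Spec_find_first_positive_number; infer_instance

-- ===== CLAIM =====
def Claim_equal_find_first_positive_number : Prop := ∀ (nums : List Int), Dom_find_first_positive_number nums → Spec_find_first_positive_number nums (find_first_positive_number nums)

-- ===== LEMMAS AND PROOFS =====
-- A's fuelled loop equals B's recursion whenever fuel covers the interval width
-- (the width shrinks by at least one per step on both sides).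
lemma pvLoopA_eq_pvTake (nums : List Int) :
    ∀ (fuel : Nat) (lo hi : Int), (hi + 1 - lo).toNat ≤ fuel →
      pvLoopA nums fuel lo hi = pvTake nums lo hi := by
  intro fuel
  induction fuel with
  | zero =>
    intro lo hi h
    rw [pvTake]
    rw [if_pos (by omega : lo > hi)]
    rfl
  | succ k ih =>
    intro lo hi h
    rw [pvLoopA, pvTake]
    have hfd : PySem.Int.floordiv (hi - lo) 2 = (hi - lo) / 2 :=
      PySem.Int.floordiv_eq_ediv_of_pos (by norm_num)
    by_cases hlr : lo ≤ hi
    · rw [if_pos hlr, if_neg (by omega : ¬ lo > hi)]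
      simp only []
      split
      · exact ih lo (lo + PySem.Int.floordiv (hi - lo) 2 - 1) (by rw [hfd]; omega)
      · exact ih (lo + PySem.Int.floordiv (hi - lo) 2 + 1) hi (by rw [hfd]; omega)
    · rw [if_neg hlr, if_pos (by omega : lo > hi)]

-- ===== VERDICT =====
theorem find_first_positive_number_spec : Claim_equal_find_first_positive_number := by
  intro nums _
  unfold Spec_find_first_positive_number find_first_positive_number find_first_positive_number_alt
  exact pvLoopA_eq_pvTake nums (nums.length + 1) 0 ((nums.length : Int) - 1) (by omega)
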